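-- pv_equiv track=rewrite | github.com/okoks9011/problem_solving | kickstart/2018_round_e/milk_tea.py | find_min_complain
-- ===== SOURCE A (Python) =====
-- def find_min_complain(prefers):
--     min_complain = []
--     weight = []
--
--     for prefer in zip(*prefers):
--         prefer_one = prefer.count(1)
--         prefer_zero = prefer.count(0)
--         if prefer_one > prefer_zero:
--             min_complain.append(1)
--         else:
--             min_complain.append(0)
--         weight.append((prefer_one, prefer_zero))
--     return tuple(min_complain), weight
-- ===== SOURCE B (Python) =====
-- def find_min_complain(prefers):
--     if not prefers:
--         return (), []
--     m = min(len(r) for r in prefers)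
--     counts = [(0, 0)] * m
--     for row in prefers:
--         counts = [(o + (v == 1), z + (v == 0)) for (o, z), v in zip(counts, row)]
--     return tuple(1 if o > z else 0 for o, z in counts), counts
-- ===== Notes on version B (the rewrite author's own statement) =====
-- stated objective: alternative
-- what changed: Replaces A's transpose-then-count-per-column pass (zip(*prefers) plus two .count scans per column) by a single row-major pass that maintains a per-column (ones, zeros) pair list updated by zipping each row against the accumulator.
import Mathlib
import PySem

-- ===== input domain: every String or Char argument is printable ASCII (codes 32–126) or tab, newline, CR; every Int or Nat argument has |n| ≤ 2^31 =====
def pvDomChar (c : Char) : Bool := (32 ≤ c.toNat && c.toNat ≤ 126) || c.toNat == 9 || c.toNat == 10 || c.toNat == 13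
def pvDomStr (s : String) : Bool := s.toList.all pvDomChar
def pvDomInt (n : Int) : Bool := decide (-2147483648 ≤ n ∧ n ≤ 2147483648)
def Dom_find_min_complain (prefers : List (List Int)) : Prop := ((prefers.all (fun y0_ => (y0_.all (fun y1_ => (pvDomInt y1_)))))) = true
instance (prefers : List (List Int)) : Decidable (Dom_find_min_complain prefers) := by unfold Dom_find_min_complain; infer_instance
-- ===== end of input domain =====

-- B replaces A's transpose-then-count-per-column pass by one row-major pass that zips each
-- row against a per-column (ones, zeros) accumulator; same cost, different decomposition.

-- ===== PORT A =====
-- zip(*prefers): the truncated transpose — column c (for c below the minimum row length)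
-- collects every row's entry at c; exact for Python's zip over the unpacked rows.
def pyZipStar (rows : List (List Int)) : List (List Int) :=
  match (rows.map List.length).min? with
  | none => []
  | some m => (List.range m).map (fun c => rows.map (fun r => r.getD c 0))

def find_min_complain (prefers : List (List Int)) : List Int × (List (Int × Int)) :=
  (pyZipStar prefers).foldl
    (fun acc prefer =>
      let prefer_one := prefer.count 1
      let prefer_zero := prefer.count 0
      (acc.1 ++ [if prefer_zero < prefer_one then (1 : Int) else 0],
       acc.2 ++ [((prefer_one : Int), (prefer_zero : Int))]))
    ([], [])

-- ===== PORT B =====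
def find_min_complain_alt (prefers : List (List Int)) : List Int × (List (Int × Int)) :=
  match (prefers.map List.length).min? with
  | none => ([], [])
  | some m =>
    let counts := prefers.foldl
      (fun acc row =>
        List.zipWith (fun p v =>
          (p.1 + (if v = 1 then (1 : Int) else 0), p.2 + (if v = 0 then (1 : Int) else 0))) acc row)
      (List.replicate m ((0 : Int), (0 : Int)))
    (counts.map (fun p => if p.2 < p.1 then (1 : Int) else 0), counts)

-- ===== PRECONDITION & SPEC =====
def Spec_find_min_complain (prefers : List (List Int)) (out : List Int × (List (Int × Int))) : Prop := out = find_min_complain_alt prefers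
instance (prefers : List (List Int)) (out : List Int × (List (Int × Int))) : Decidable (Spec_find_min_complain prefers out) := by unfold Spec_find_min_complain; infer_instance

-- ===== CLAIM (what is proved, stated in full; the proofs are below) =====
def Claim_equal_find_min_complain : Prop := ∀ (prefers : List (List Int)), Dom_find_min_complain prefers → Spec_find_min_complain prefers (find_min_complain prefers)

-- ===== LEMMAS AND PROOFS =====

-- the number of 1s (resp. 0s) seen at column c across the rows
def cnt (v : Int) (rows : List (List Int)) (c : Nat) : Nat :=
  (rows.map (fun r => r.getD c 0)).count v

-- A's foldl with list-append accumulator is a pair of maps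
lemma foldl_pair_append (cols : List (List Int)) (a : List Int) (b : List (Int × Int)) :
    cols.foldl
      (fun acc prefer =>
        let prefer_one := prefer.count 1
        let prefer_zero := prefer.count 0
        (acc.1 ++ [if prefer_zero < prefer_one then (1 : Int) else 0],
         acc.2 ++ [((prefer_one : Int), (prefer_zero : Int))]))
      (a, b)
    = (a ++ cols.map (fun p => if p.count 0 < p.count 1 then (1 : Int) else 0),
       b ++ cols.map (fun p => (((p.count 1 : Nat) : Int), ((p.count 0 : Nat) : Int)))) := by
  induction cols generalizing a b with
  | nil => simp
  | cons p ps ih => simp only [List.foldl_cons]; rw [ih]; simp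

-- B's inner zipWith step, pointwise
lemma step_getD (acc : List (Int × Int)) (row : List Int) (c : Nat)
    (hc : c < acc.length) (hrow : acc.length ≤ row.length) :
    (List.zipWith (fun p v =>
        (p.1 + (if v = 1 then (1 : Int) else 0), p.2 + (if v = 0 then (1 : Int) else 0))) acc row).getD c (0, 0)
    = ((acc.getD c (0, 0)).1 + (if row.getD c 0 = 1 then (1 : Int) else 0),
       (acc.getD c (0, 0)).2 + (if row.getD c 0 = 0 then (1 : Int) else 0)) := by
  have hlen : (List.zipWith (fun p v =>
      (p.1 + (if v = 1 then (1 : Int) else 0), p.2 + (if v = 0 then (1 : Int) else 0))) acc row).length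
      = acc.length := by simp [List.length_zipWith]; omega
  have hcr : c < row.length := lt_of_lt_of_le hc hrow
  rw [List.getD_eq_getElem _ _ (by omega), List.getElem_zipWith]
  rw [List.getD_eq_getElem _ _ hc, List.getD_eq_getElem _ _ hcr]

lemma step_length (acc : List (Int × Int)) (row : List Int) (hrow : acc.length ≤ row.length) :
    (List.zipWith (fun p v =>
        (p.1 + (if v = 1 then (1 : Int) else 0), p.2 + (if v = 0 then (1 : Int) else 0))) acc row).length
    = acc.length := by simp [List.length_zipWith]; omega

-- invariant of B's row-major fold
lemma fold_counts (rows : List (List Int)) (acc : List (Int × Int))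
    (h : ∀ r ∈ rows, acc.length ≤ r.length) :
    (rows.foldl
      (fun acc row =>
        List.zipWith (fun p v =>
          (p.1 + (if v = 1 then (1 : Int) else 0), p.2 + (if v = 0 then (1 : Int) else 0))) acc row)
      acc).length = acc.length ∧
    ∀ c < acc.length,
      (rows.foldl
        (fun acc row =>
          List.zipWith (fun p v =>
            (p.1 + (if v = 1 then (1 : Int) else 0), p.2 + (if v = 0 then (1 : Int) else 0))) acc row)
        acc).getD c (0, 0)
      = ((acc.getD c (0, 0)).1 + (cnt 1 rows c : Int), (acc.getD c (0, 0)).2 + (cnt 0 rows c : Int)) := by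
  induction rows generalizing acc with
  | nil => simp [cnt]
  | cons r rs ih =>
    have hr : acc.length ≤ r.length := h r (by simp)
    have hstep := step_length acc r hr
    have ih' := ih (List.zipWith _ acc r) (by intro x hx; rw [hstep]; exact h x (by simp [hx]))
    constructor
    · simpa [hstep] using ih'.1
    · intro c hc
      rw [List.foldl_cons, ih'.2 c (by rw [hstep]; exact hc), step_getD acc r c hc hr]
      have : ∀ v : Int, cnt v (r :: rs) c = (if r.getD c 0 = v then 1 else 0) + cnt v rs c := by
        intro v; simp [cnt, List.count_cons]; omega
      rw [this 1, this 0]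
      push_cast
      simp only [Prod.mk.injEq]
      constructor <;> ring

-- min? = some m gives m ≤ every row length
lemma min_le_lengths (rows : List (List Int)) (m : Nat)
    (h : (rows.map List.length).min? = some m) : ∀ r ∈ rows, m ≤ r.length := by
  intro r hr
  exact (List.min?_eq_some_iff.mp h).2 _ (List.mem_map_of_mem hr)

theorem A_eq (prefers : List (List Int)) :
    find_min_complain prefers
    = match (prefers.map List.length).min? with
      | none => ([], [])
      | some m =>
        ((List.range m).map (fun c => if cnt 0 prefers c < cnt 1 prefers c then (1 : Int) else 0),
         (List.range m).map (fun c => ((cnt 1 prefers c : Int), (cnt 0 prefers c : Int)))) := by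
  unfold find_min_complain pyZipStar
  cases hm : (prefers.map List.length).min? with
  | none => simp
  | some m =>
    rw [foldl_pair_append]
    simp only [List.nil_append, List.map_map]
    rfl

theorem B_eq (prefers : List (List Int)) :
    find_min_complain_alt prefers
    = match (prefers.map List.length).min? with
      | none => ([], [])
      | some m =>
        ((List.range m).map (fun c => if cnt 0 prefers c < cnt 1 prefers c then (1 : Int) else 0),
         (List.range m).map (fun c => ((cnt 1 prefers c : Int), (cnt 0 prefers c : Int)))) := by
  unfold find_min_complain_alt
  cases hm : (prefers.map List.length).min? with
  | none => rfl
  | some m =>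
    have hle : ∀ r ∈ prefers, (List.replicate m ((0:Int),(0:Int))).length ≤ r.length := by
      intro r hr; simpa using min_le_lengths prefers m hm r hr
    have hf := fold_counts prefers (List.replicate m ((0:Int),(0:Int))) hle
    simp only [List.length_replicate] at hf
    have hcounts : prefers.foldl
        (fun acc row =>
          List.zipWith (fun p v =>
            (p.1 + (if v = 1 then (1 : Int) else 0), p.2 + (if v = 0 then (1 : Int) else 0))) acc row)
        (List.replicate m ((0:Int),(0:Int)))
        = (List.range m).map (fun c => ((cnt 1 prefers c : Int), (cnt 0 prefers c : Int))) := by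
      apply List.ext_getElem
      · simp [hf.1]
      · intro c h1 h2
        have hc : c < m := by simpa [hf.1] using h1
        have hgd := hf.2 c hc
        rw [List.getD_eq_getElem _ _ h1, List.getD_replicate _ hc] at hgd
        simp only [zero_add] at hgd
        simp only [List.getElem_map, List.getElem_range]
        exact hgd
    simp only [hcounts, List.map_map]
    simp [Function.comp]

-- ===== VERDICT (by name: the statement is the Claim_ definition above) =====
theorem find_min_complain_spec : Claim_equal_find_min_complain := by
  intro prefers _
  unfold Spec_find_min_complain
  rw [A_eq, B_eq]
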